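-- pv_equiv track=rewrite | github.com/lrlbbzl/PTD-SQL | matching.py | auto_prompting
-- ===== SOURCE A (Python) =====
-- def find_overlap_indices(a, b, shots):
--     def overlap_count(tokens1, tokens2):
--         return len(set(tokens1).intersection(set(tokens2)))
--     overlap_scores = [overlap_count(sentence_tokens, b) for sentence_tokens in a]
--     top_indices = sorted(range(len(overlap_scores)), key=lambda i: overlap_scores[i], reverse=True)[:shots]
--
--     return top_indices
--
-- def auto_prompting(test_data, train_data, shots=4, type='count'):
--     questions = [x['question'] for x in train_data]
--     question_tokens = [xx.split(' ') for xx in questions]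
--     selected_idx = []
--     for i, x in enumerate(test_data):
--         temp = find_overlap_indices(question_tokens, x['question'].split(' '), shots)
--         selected_idx.append(temp)
--     matching_list = {
--         test_data[i]['question'] : [train_data[idx]['question'] for idx in selected_idx[i]] for i in range(len(selected_idx))
--     }
--     return matching_list
-- ===== SOURCE B (Python) =====
-- def auto_prompting(test_data, train_data, shots=4, type='count'):
--     train_qs = [x['question'] for x in train_data]
--     # inverted index: token -> ascending list of train indices whose question contains it
--     index = {}
--     for i, q in enumerate(train_qs):
--         for t in set(q.split(' ')):
--             index.setdefault(t, []).append(i)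
--     result = {}
--     for x in test_data:
--         q = x['question']
--         hits = []
--         for t in set(q.split(' ')):
--             hits.extend(index.get(t, []))
--         cnt = {}
--         for i in hits:
--             cnt[i] = cnt.get(i, 0) + 1
--         order = sorted(range(len(train_qs)), key=lambda i: cnt.get(i, 0), reverse=True)[:shots]
--         result[q] = [train_qs[i] for i in order]
--     return result
-- ===== Notes on version B (the rewrite author's own statement) =====
-- stated objective: alternative
-- what changed: B replaces A's per-(test,train)-pair set intersections with an inverted token->train-indices index built once over the train questions; each test question is scored by counting index hits for its distinct tokens, then the same stable reverse sort and slice pick the shots.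
import Mathlib
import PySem

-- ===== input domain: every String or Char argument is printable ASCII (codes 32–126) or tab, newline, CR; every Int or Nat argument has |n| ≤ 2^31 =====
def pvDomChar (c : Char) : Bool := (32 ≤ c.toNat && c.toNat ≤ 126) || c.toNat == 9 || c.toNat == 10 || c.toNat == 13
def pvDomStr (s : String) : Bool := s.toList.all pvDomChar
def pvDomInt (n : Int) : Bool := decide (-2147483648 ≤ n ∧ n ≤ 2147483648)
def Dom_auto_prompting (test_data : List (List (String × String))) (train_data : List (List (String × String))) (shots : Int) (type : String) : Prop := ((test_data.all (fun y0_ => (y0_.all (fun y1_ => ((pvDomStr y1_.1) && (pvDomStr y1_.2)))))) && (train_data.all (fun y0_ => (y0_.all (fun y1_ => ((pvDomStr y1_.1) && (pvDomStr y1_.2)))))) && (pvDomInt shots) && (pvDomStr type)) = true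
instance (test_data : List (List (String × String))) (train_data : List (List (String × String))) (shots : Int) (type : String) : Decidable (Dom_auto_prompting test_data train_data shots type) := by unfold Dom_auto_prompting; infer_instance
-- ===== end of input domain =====

-- B replaces A's per-(test,train) set intersections by an inverted token index built once over the
-- train questions, scoring each test question only through the index hits (alternative data structure).

-- x['question'] (both Pythons): first-match lookup in the row's association list; total under Pre_
def pvQ (x : List (String × String)) : String := (PySem.Dict.mk x).getD "question" ""

-- s.split(' '): split? is exact for every string; the separator " " is nonempty so it is never none
def pvSplit (s : String) : List String := (PySem.Str.split? s " ").getD []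

-- ===== PORT A =====
def pvOverlapCount (tokens1 tokens2 : List String) : Int :=
  PySem.Set.len (PySem.Set.inter (PySem.Set.ofList tokens1) (PySem.Set.ofList tokens2))

def pvFindOverlapIndices (a : List (List String)) (b : List String) (shots : Int) : List Int :=
  let overlap_scores := a.map (fun sentence_tokens => pvOverlapCount sentence_tokens b)
  PySem.List.slice
    (PySem.List.sorted (PySem.List.pyRange 0 (PySem.List.len overlap_scores))
      (fun i => PySem.List.pyGetD overlap_scores i 0) true)
    none (some shots)

def auto_prompting (test_data : List (List (String × String))) (train_data : List (List (String × String))) (shots : Int) (type : String) : List (String × List String) :=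
  let questions := train_data.map pvQ
  let question_tokens := questions.map pvSplit
  let selected_idx := (PySem.List.enumerate test_data 0).foldl
    (fun acc p => acc ++ [pvFindOverlapIndices question_tokens (pvSplit (pvQ p.2)) shots]) []
  ((PySem.List.pyRange 0 (PySem.List.len selected_idx)).foldl
    (fun d i => d.insert (pvQ (PySem.List.pyGetD test_data i []))
      ((PySem.List.pyGetD selected_idx i []).map (fun idx => pvQ (PySem.List.pyGetD train_data idx []))))
    PySem.Dict.empty).items

-- ===== PORT B =====
def auto_prompting_alt (test_data : List (List (String × String))) (train_data : List (List (String × String))) (shots : Int) (type : String) : List (String × List String) :=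
  let train_qs := train_data.map pvQ
  let index := (PySem.List.enumerate train_qs 0).foldl
    (fun d p => (PySem.Set.ofList (pvSplit p.2)).foldl
      (fun d t => d.modify t [] (fun l => l ++ [p.1])) d) PySem.Dict.empty
  (test_data.foldl (fun res x =>
    let q := pvQ x
    let hits := (PySem.Set.ofList (pvSplit q)).foldl (fun h t => h ++ index.getD t []) []
    let cnt := hits.foldl (fun d i => d.insert i (d.getD i 0 + 1)) (PySem.Dict.empty : PySem.Dict Int Int)
    let order := PySem.List.slice
      (PySem.List.sorted (PySem.List.pyRange 0 (PySem.List.len train_qs)) (fun i => cnt.getD i 0) true)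
      none (some shots)
    res.insert q (order.map (fun i => PySem.List.pyGetD train_qs i ""))) PySem.Dict.empty).items

-- ===== PRECONDITION & SPEC =====
-- Pre_ excludes exactly the inputs where a row lacks the key 'question', on which the Python A raises KeyError
def Pre_auto_prompting (test_data : List (List (String × String))) (train_data : List (List (String × String))) (shots : Int) (type : String) : Prop :=
  (∀ x ∈ test_data, (PySem.Dict.mk x).contains "question" = true) ∧
  (∀ x ∈ train_data, (PySem.Dict.mk x).contains "question" = true)
instance (test_data : List (List (String × String))) (train_data : List (List (String × String))) (shots : Int) (type : String) : Decidable (Pre_auto_prompting test_data train_data shots type) := by unfold Pre_auto_prompting; infer_instance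

def pvWitness_auto_prompting : (List (List (String × String))) × (List (List (String × String))) × Int × String :=
  ([[("question", "a b")]], [[("question", "b c")], [("question", "x")]], 4, "count")

def Spec_auto_prompting (test_data : List (List (String × String))) (train_data : List (List (String × String))) (shots : Int) (type : String) (out : List (String × List String)) : Prop := out = auto_prompting_alt test_data train_data shots type
instance (test_data : List (List (String × String))) (train_data : List (List (String × String))) (shots : Int) (type : String) (out : List (String × List String)) : Decidable (Spec_auto_prompting test_data train_data shots type out) := by unfold Spec_auto_prompting; infer_instance

-- ===== CLAIM (what is proved, stated in full; the proofs are below) =====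
def Claim_equal_auto_prompting : Prop := ∀ (test_data : List (List (String × String))) (train_data : List (List (String × String))) (shots : Int) (type : String), Dom_auto_prompting test_data train_data shots type → Pre_auto_prompting test_data train_data shots type → Spec_auto_prompting test_data train_data shots type (auto_prompting test_data train_data shots type)

-- ===== LEMMAS AND PROOFS =====

-- proof-side abbreviations for the pieces of B (definitionally equal to the unfolded B)
def pvHits (qs S : List String) : List Int :=
  (PySem.Set.ofList S).foldl (fun h t =>
    h ++ ((PySem.List.enumerate qs 0).foldl
      (fun d p => (PySem.Set.ofList (pvSplit p.2)).foldl
        (fun d t' => d.modify t' [] (fun l => l ++ [p.1])) d) PySem.Dict.empty).getD t []) []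

def pvKeyB (qs S : List String) (i : Int) : Int :=
  ((pvHits qs S).foldl (fun d i => d.insert i (d.getD i 0 + 1)) PySem.Dict.empty).getD i 0

-- insertion with pointwise-equal comparators
lemma pv_insertBy_congr {α : Type} (b1 b2 : α → α → Bool) (x : α) (ys : List α)
    (h : ∀ y ∈ ys, b1 x y = b2 x y) : PySem.List.insertBy b1 x ys = PySem.List.insertBy b2 x ys := by
  induction ys with
  | nil => rfl
  | cons y ys ih =>
    simp only [PySem.List.insertBy, h y (by simp)]
    split <;> simp [ih (fun z hz => h z (by simp [hz]))]

-- sorted(xs, key, reverse=True) only looks at the keys of members of xs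
lemma pv_sorted_rev_congr {α : Type} (xs : List α) (k1 k2 : α → Int)
    (h : ∀ x ∈ xs, k1 x = k2 x) :
    PySem.List.sorted xs k1 true = PySem.List.sorted xs k2 true := by
  rw [PySem.List.sorted_rev_eq_foldl_insertBy, PySem.List.sorted_rev_eq_foldl_insertBy]
  suffices H : ∀ (l : List α) (acc : List α), (∀ x ∈ l, k1 x = k2 x) → (∀ y ∈ acc, k1 y = k2 y) →
      l.foldl (fun acc x => PySem.List.insertBy (fun a b => decide (k1 b < k1 a)) x acc) acc
      = l.foldl (fun acc x => PySem.List.insertBy (fun a b => decide (k2 b < k2 a)) x acc) acc by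
    exact H xs [] h (by simp)
  intro l
  induction l with
  | nil => intro acc _ _; rfl
  | cons x l ih =>
    intro acc hl hacc
    simp only [List.foldl_cons]
    rw [pv_insertBy_congr _ (fun a b => decide (k2 b < k2 a)) x acc
      (fun y hy => by rw [hl x (by simp), hacc y hy])]
    exact ih _ (fun z hz => hl z (by simp [hz]))
      (fun y hy => by
        rcases (PySem.List.mem_insertBy _ _ _ _).1 hy with h1 | h1
        · rw [h1]; exact hl x (by simp)
        · exact hacc y h1)

-- the inner index loop over one (i, question) pair, seen through getD
lemma pv_inner_getD (S : List String) (i : Int) (d : PySem.Dict String (List Int)) (t : String) :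
    ((PySem.Set.ofList S).foldl (fun d t' => d.modify t' [] (fun l => l ++ [i])) d).getD t []
      = d.getD t [] ++ (if t ∈ PySem.Set.ofList S then [i] else []) := by
  have h1 : (PySem.Set.ofList S).foldl (fun d t' => d.modify t' [] (fun l => l ++ [i])) d
      = ((PySem.Set.ofList S).map (fun t' => (t', i))).foldl
          (fun d p => d.modify p.1 [] (fun l => l ++ [p.2])) d := by
    rw [List.foldl_map]
  rw [h1, PySem.Dict.getD_foldl_modify_append]
  congr 1
  rw [List.filter_map, List.map_map]
  have hq : List.filter ((fun p : String × Int => p.1 == t) ∘ fun t' => (t', i)) (PySem.Set.ofList S)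
      = List.filter (fun a => a == t) (PySem.Set.ofList S) := rfl
  rw [hq, List.filter_beq]
  by_cases hm : t ∈ PySem.Set.ofList S
  · rw [List.count_eq_one_of_mem (PySem.Set.nodup_ofList S) hm]
    simp [hm]
  · rw [List.count_eq_zero_of_not_mem hm]
    simp [hm]

-- the inverted index, characterised: index[t] lists the i with t among question i's tokens, in order
lemma pv_index_getD (L : List (Int × String)) (d : PySem.Dict String (List Int)) (t : String) :
    (L.foldl (fun d p => (PySem.Set.ofList (pvSplit p.2)).foldl
        (fun d t' => d.modify t' [] (fun l => l ++ [p.1])) d) d).getD t []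
      = d.getD t [] ++ L.flatMap (fun p => if t ∈ PySem.Set.ofList (pvSplit p.2) then [p.1] else []) := by
  induction L generalizing d with
  | nil => simp
  | cons p L ih =>
    simp only [List.foldl_cons, List.flatMap_cons, ih, pv_inner_getD, List.append_assoc]

-- counting one train index inside the flattened per-token index lists
lemma pv_count_flatMap_if (L : List (Int × String)) (hL : L.Pairwise (fun p q => p.1 < q.1))
    (t : String) (k : Int) :
    (L.flatMap (fun p => if t ∈ PySem.Set.ofList (pvSplit p.2) then [p.1] else [])).count k
      = if ∃ p ∈ L, p.1 = k ∧ t ∈ PySem.Set.ofList (pvSplit p.2) then 1 else 0 := by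
  induction L with
  | nil => simp
  | cons p L ih =>
    have hlt := (List.pairwise_cons.1 hL).1
    have hL' := (List.pairwise_cons.1 hL).2
    simp only [List.flatMap_cons, List.count_append, ih hL']
    by_cases hm : t ∈ PySem.Set.ofList (pvSplit p.2)
    · by_cases hk : p.1 = k
      · have hnone : ¬ ∃ q ∈ L, q.1 = k ∧ t ∈ PySem.Set.ofList (pvSplit q.2) := by
          rintro ⟨q, hq, hqk, -⟩
          have := hlt q hq; omega
        have hyes : ∃ q ∈ p :: L, q.1 = k ∧ t ∈ PySem.Set.ofList (pvSplit q.2) :=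
          ⟨p, List.mem_cons_self, hk, hm⟩
        rw [if_neg hnone, if_pos hyes]
        simp [hm, hk]
      · have h1 : List.count k [p.1] = 0 := by simp [List.count_singleton]; omega
        rw [if_pos hm, h1]
        by_cases hex : ∃ q ∈ L, q.1 = k ∧ t ∈ PySem.Set.ofList (pvSplit q.2)
        · have hyes : ∃ q ∈ p :: L, q.1 = k ∧ t ∈ PySem.Set.ofList (pvSplit q.2) := by
            obtain ⟨q, hq, h⟩ := hex; exact ⟨q, List.mem_cons_of_mem p hq, h⟩
          rw [if_pos hex, if_pos hyes]
        · have hno : ¬ ∃ q ∈ p :: L, q.1 = k ∧ t ∈ PySem.Set.ofList (pvSplit q.2) := by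
            rintro ⟨q, hq, hqk, hqt⟩
            rcases List.mem_cons.1 hq with rfl | hq'
            · exact hk hqk
            · exact hex ⟨q, hq', hqk, hqt⟩
          rw [if_neg hex, if_neg hno]
    · rw [if_neg hm]
      have hiff : (∃ q ∈ L, q.1 = k ∧ t ∈ PySem.Set.ofList (pvSplit q.2))
          ↔ (∃ q ∈ p :: L, q.1 = k ∧ t ∈ PySem.Set.ofList (pvSplit q.2)) := by
        constructor
        · rintro ⟨q, hq, h⟩; exact ⟨q, List.mem_cons_of_mem p hq, h⟩
        · rintro ⟨q, hq, hqk, hqt⟩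
          rcases List.mem_cons.1 hq with rfl | hq'
          · exact absurd hqt hm
          · exact ⟨q, hq', hqk, hqt⟩
      rw [if_congr hiff rfl rfl]
      simp

-- Nat form of "a 0/1 sum is countP"
lemma pv_sum_ite_nat {α : Type} (p : α → Prop) [DecidablePred p] (l : List α) :
    (l.map (fun x => if p x then 1 else 0)).sum = l.countP (fun x => decide (p x)) := by
  induction l with
  | nil => rfl
  | cons x l ih =>
    by_cases hx : p x <;> simp [hx, ih, Nat.add_comm]

-- A's per-pair intersection size, as a count over the distinct test tokens
lemma pv_overlap_eq (T S : List String) :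
    pvOverlapCount T S
      = ((PySem.Set.ofList S).countP (fun t => decide (t ∈ PySem.Set.ofList T)) : Int) := by
  unfold pvOverlapCount
  have h1 : PySem.Set.inter (PySem.Set.ofList T) (PySem.Set.ofList S)
      |>.Perm ((PySem.Set.ofList S).filter (fun t => decide (t ∈ PySem.Set.ofList T))) := by
    rw [List.perm_ext_iff_of_nodup
      (PySem.Set.nodup_inter _ _ (PySem.Set.nodup_ofList T))
      ((PySem.Set.nodup_ofList S).filter _)]
    intro a
    simp [PySem.Set.mem_inter, List.mem_filter, and_comm]
  have h2 := h1.length_eq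
  simp only [PySem.Set.len, h2, List.countP_eq_length_filter]

-- the central fact: for a train index i in range, A's overlap score at i equals
-- the number of times i is hit through B's inverted index
lemma pv_key_eq (qs : List String) (S : List String) (i : Int)
    (h0 : 0 ≤ i) (hn : i < (qs.length : Int)) :
    PySem.List.pyGetD ((qs.map pvSplit).map (fun t => pvOverlapCount t S)) i 0
      = ((pvHits qs S).count i : Int) := by
  have hlt : i.toNat < qs.length := by omega
  have hA : PySem.List.pyGetD ((qs.map pvSplit).map (fun t => pvOverlapCount t S)) i 0
      = pvOverlapCount (pvSplit qs[i.toNat]) S := by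
    rw [PySem.List.pyGetD_eq_getElem _ _ h0 (by simpa using hn)]
    simp
  have hhits : pvHits qs S
      = (PySem.Set.ofList S).flatMap
          (fun t => (PySem.List.enumerate qs 0).flatMap
            (fun p => if t ∈ PySem.Set.ofList (pvSplit p.2) then [p.1] else [])) := by
    unfold pvHits
    rw [PySem.List.foldl_append_eq_flatMap]
    simp only [List.nil_append]
    congr 1
    funext t
    rw [pv_index_getD]
    simp
  rw [hA, hhits, pv_overlap_eq, List.count_flatMap]
  have hcount : ∀ t ∈ PySem.Set.ofList S,
      (List.count i ∘ fun t => (PySem.List.enumerate qs 0).flatMap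
        (fun p => if t ∈ PySem.Set.ofList (pvSplit p.2) then [p.1] else [])) t
      = if t ∈ PySem.Set.ofList (pvSplit qs[i.toNat]) then 1 else 0 := by
    intro t _
    simp only [Function.comp]
    rw [pv_count_flatMap_if _ (PySem.List.pairwise_lt_enumerate qs 0) t i]
    congr 1
    simp only [eq_iff_iff]
    constructor
    · rintro ⟨p, hp, hpk, hpt⟩
      obtain ⟨k, hk, rfl⟩ := (PySem.List.mem_enumerate_iff _ _ _).1 hp
      simp only [Int.zero_add] at hpk
      have : k = i.toNat := by omega
      subst this
      exact hpt
    · intro ht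
      refine ⟨((i.toNat : Int), qs[i.toNat]), ?_, by omega, ht⟩
      rw [PySem.List.mem_enumerate_iff]
      exact ⟨i.toNat, hlt, by simp⟩
  rw [List.map_congr_left hcount,
    pv_sum_ite_nat (fun t => t ∈ PySem.Set.ofList (pvSplit qs[i.toNat]))]

-- per test question: A's selected index list equals B's order list
lemma pv_order_eq (qs : List String) (S : List String) (shots : Int) :
    pvFindOverlapIndices (qs.map pvSplit) S shots
      = PySem.List.slice
          (PySem.List.sorted (PySem.List.pyRange 0 (PySem.List.len qs)) (pvKeyB qs S) true)
          none (some shots) := by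
  simp only [pvFindOverlapIndices]
  have hlen : PySem.List.len ((qs.map pvSplit).map (fun t => pvOverlapCount t S)) = PySem.List.len qs := by
    simp [PySem.List.len_eq]
  rw [hlen]
  congr 1
  apply pv_sorted_rev_congr
  intro i hi
  have hi' := PySem.List.mem_pyRange_one.1 hi
  simp only [PySem.List.len_eq] at hi'
  unfold pvKeyB
  rw [PySem.Dict.foldl_insert_getD_add_one_eq_counter, PySem.Dict.getD_counter]
  exact pv_key_eq qs S i hi'.1 hi'.2

-- looking a selected index up in train_data and taking its question is looking it up in train_qs
lemma pv_lookup_eq (tr : List (List (String × String))) (idx : Int) :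
    pvQ (PySem.List.pyGetD tr idx []) = PySem.List.pyGetD (tr.map pvQ) idx "" := by
  have h : pvQ ([] : List (String × String)) = "" := rfl
  rw [← h, PySem.List.pyGetD_map]

-- per test row: A's selected questions equal B's selected questions
lemma pv_row_eq (tr : List (List (String × String))) (shots : Int) (S : List String) :
    (pvFindOverlapIndices ((tr.map pvQ).map pvSplit) S shots).map
        (fun idx => pvQ (PySem.List.pyGetD tr idx []))
      = (PySem.List.slice
          (PySem.List.sorted (PySem.List.pyRange 0 (PySem.List.len (tr.map pvQ)))
            (pvKeyB (tr.map pvQ) S) true)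
          none (some shots)).map (fun i => PySem.List.pyGetD (tr.map pvQ) i "") := by
  rw [pv_order_eq (tr.map pvQ) S shots]
  exact List.map_congr_left (fun idx _ => pv_lookup_eq tr idx)

-- ===== VERDICT (by name: the statement is the Claim_ definition above) =====
set_option maxHeartbeats 1600000 in
theorem auto_prompting_spec : Claim_equal_auto_prompting := by
  intro td tr shots type _ _
  simp only [Spec_auto_prompting, auto_prompting, auto_prompting_alt]
  rw [PySem.List.foldl_append_singleton_eq_map, List.nil_append]
  have hsel : (PySem.List.enumerate td 0).map
      (fun p => pvFindOverlapIndices ((tr.map pvQ).map pvSplit)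
        (pvSplit (pvQ p.2)) shots)
      = td.map (fun x => pvFindOverlapIndices ((tr.map pvQ).map pvSplit)
        (pvSplit (pvQ x)) shots) := by
    conv_rhs => rw [← PySem.List.map_snd_enumerate td 0, List.map_map]
    rfl
  rw [hsel]
  have hlen : PySem.List.len (td.map
      (fun x => pvFindOverlapIndices ((tr.map pvQ).map pvSplit)
        (pvSplit (pvQ x)) shots)) = PySem.List.len td := by
    simp [PySem.List.len_eq]
  rw [hlen]
  rw [PySem.List.foldl_congr_mem _ _
    (fun d i => d.insert (pvQ (PySem.List.pyGetD td i []))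
      ((pvFindOverlapIndices ((tr.map pvQ).map pvSplit)
        (pvSplit (pvQ (PySem.List.pyGetD td i []))) shots).map
        (fun idx => pvQ (PySem.List.pyGetD tr idx [])))) _ ?hbody]
  case hbody =>
    intro acc i hi
    beta_reduce
    have h2 := PySem.List.mem_pyRange_one.1 hi
    simp only [PySem.List.len_eq] at h2
    rw [PySem.List.pyGetD_eq_getElem td ([] : List (String × String)) h2.1 (by simpa using h2.2)]
    rw [PySem.List.pyGetD_eq_getElem _ ([] : List Int) h2.1 (by simp; omega)]
    simp
  have hA2 : List.foldl
      (fun d i => d.insert (pvQ (PySem.List.pyGetD td i []))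
        ((pvFindOverlapIndices ((tr.map pvQ).map pvSplit)
          (pvSplit (pvQ (PySem.List.pyGetD td i []))) shots).map
          (fun idx => pvQ (PySem.List.pyGetD tr idx []))))
      PySem.Dict.empty (PySem.List.pyRange 0 (PySem.List.len td))
      = td.foldl
      (fun d x => d.insert (pvQ x)
        ((pvFindOverlapIndices ((tr.map pvQ).map pvSplit)
          (pvSplit (pvQ x)) shots).map
          (fun idx => pvQ (PySem.List.pyGetD tr idx []))))
      PySem.Dict.empty :=
    PySem.List.foldl_pyRange_zero_pyGetD td []
      (fun d x => d.insert (pvQ x)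
        ((pvFindOverlapIndices ((tr.map pvQ).map pvSplit)
          (pvSplit (pvQ x)) shots).map
          (fun idx => pvQ (PySem.List.pyGetD tr idx []))))
      PySem.Dict.empty
  rw [hA2]
  congr 1
  apply PySem.List.foldl_congr_mem
  intro acc x _
  refine congrArg (acc.insert (pvQ x)) ?_
  rw [pv_row_eq tr shots (pvSplit (pvQ x))]
  delta pvKeyB pvHits
  rfl
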